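-- pv_equiv track=rewrite | github.com/racarlos/HomeRisQ | extraFunctions.py | getSubsetComputationAllocation
-- ===== SOURCE A (Python) =====
-- def getSubsetComputationAllocation(vulnCount, coreCount):
--
--     # Add Responsibilities based on number of Cores
--     responsibilities = []
--
--     for i in range(coreCount):
--         responsibilities.append([])
--
--     index = 0
--     flip = False
--     for i in range(vulnCount):
--
--         if flip is False:
--             responsibilities[index].append(i)
--             index += 1
--         elif flip is True:
--             responsibilities[index].append(i)
--             index -= 1
--
--
--         if index == coreCount and flip is False:
--             index = 3
--             flip = True
--             continue
--         elif index == -1 and flip is True: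
--             index = 0
--             flip = False
--         continue
--
--     return responsibilities
-- ===== SOURCE B (Python) =====
-- def getSubsetComputationAllocation(vulnCount, coreCount):
--     # One cycle of the zigzag: up through all cores, then down through cores 3,2,1,0.
--     pattern = list(range(coreCount)) + [3, 2, 1, 0]
--     responsibilities = [[] for _ in range(coreCount)]
--     for i in range(vulnCount):
--         responsibilities[pattern[i % len(pattern)]].append(i)
--     return responsibilities
-- ===== Notes on version B (the rewrite author's own statement) =====
-- stated objective: simpler
-- what changed: Replaced the flip/index zigzag state machine with a precomputed one-cycle pattern (range(coreCount) followed by 3,2,1,0) indexed by i modulo the cycle length.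
import Mathlib
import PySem

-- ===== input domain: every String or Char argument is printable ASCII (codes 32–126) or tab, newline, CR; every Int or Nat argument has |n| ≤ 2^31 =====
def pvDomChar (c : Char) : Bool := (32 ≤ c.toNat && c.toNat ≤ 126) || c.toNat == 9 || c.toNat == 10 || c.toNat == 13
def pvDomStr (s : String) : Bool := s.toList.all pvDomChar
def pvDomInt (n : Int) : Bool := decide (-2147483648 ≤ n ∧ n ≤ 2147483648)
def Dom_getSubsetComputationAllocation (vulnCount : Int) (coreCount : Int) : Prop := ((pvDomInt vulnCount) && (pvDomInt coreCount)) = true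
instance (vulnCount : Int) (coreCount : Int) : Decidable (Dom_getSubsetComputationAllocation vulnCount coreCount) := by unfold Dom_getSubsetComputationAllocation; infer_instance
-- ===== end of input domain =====

-- B replaces A's flip/index zigzag state machine with a precomputed one-cycle pattern
-- (range(coreCount) followed by [3,2,1,0]) indexed by i modulo the cycle length; simpler, same cost.


-- ===== PORT A =====
-- responsibilities[idx].append(x); Python raises IndexError when idx is out of range — those
-- inputs are excluded by Pre_, so the out-of-range fallback (rs unchanged) is never reached on
-- admitted inputs; idx is never negative at an append in either program.
def pyAppendAt (rs : List (List Int)) (idx : Int) (x : Int) : List (List Int) :=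
  if 0 ≤ idx then rs.modify idx.toNat (fun ys => ys ++ [x]) else rs

-- one iteration of A's vulnerability loop: append, move index, then the two flip checks in order
def stepA (coreCount : Int) (st : List (List Int) × Int × Bool) (i : Int) :
    List (List Int) × Int × Bool :=
  let rs := st.1
  let index := st.2.1
  let flip := st.2.2
  let rs' := pyAppendAt rs index i
  let index' := if flip = false then index + 1 else index - 1
  if index' = coreCount ∧ flip = false then (rs', 3, true)
  else if index' = -1 ∧ flip = true then (rs', 0, false)
  else (rs', index', flip)

def getSubsetComputationAllocation (vulnCount : Int) (coreCount : Int) : List (List Int) :=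
  let responsibilities : List (List Int) :=
    (PySem.List.pyRange 0 coreCount 1).foldl (fun rs _ => rs ++ [[]]) []
  ((PySem.List.pyRange 0 vulnCount 1).foldl (stepA coreCount) (responsibilities, 0, false)).1

-- ===== PORT B =====
def getSubsetComputationAllocation_alt (vulnCount : Int) (coreCount : Int) : List (List Int) :=
  let pattern : List Int := PySem.List.pyRange 0 coreCount 1 ++ [3, 2, 1, 0]
  let responsibilities : List (List Int) :=
    (PySem.List.pyRange 0 coreCount 1).map (fun _ => [])
  (PySem.List.pyRange 0 vulnCount 1).foldl
    (fun rs i =>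
      pyAppendAt rs (PySem.List.pyGetD pattern (PySem.Int.mod i (pattern.length : Int)) 0) i)
    responsibilities

-- ===== PRECONDITION & SPEC =====
-- Pre_ excludes exactly the inputs on which Python A raises IndexError (and Python B raises the
-- same way): vulnCount > 0 with coreCount ≤ 0, or 1 ≤ coreCount ≤ 3 with vulnCount > coreCount.
def Pre_getSubsetComputationAllocation (vulnCount : Int) (coreCount : Int) : Prop :=
  vulnCount ≤ 0 ∨ 4 ≤ coreCount ∨ (1 ≤ coreCount ∧ vulnCount ≤ coreCount)
instance (vulnCount : Int) (coreCount : Int) : Decidable (Pre_getSubsetComputationAllocation vulnCount coreCount) := by unfold Pre_getSubsetComputationAllocation; infer_instance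
def pvWitness_getSubsetComputationAllocation : Int × Int := (11, 5)

def Spec_getSubsetComputationAllocation (vulnCount : Int) (coreCount : Int) (out : List (List Int)) : Prop := out = getSubsetComputationAllocation_alt vulnCount coreCount
instance (vulnCount : Int) (coreCount : Int) (out : List (List Int)) : Decidable (Spec_getSubsetComputationAllocation vulnCount coreCount out) := by unfold Spec_getSubsetComputationAllocation; infer_instance

-- ===== CLAIM (what is proved, stated in full; the proofs are below) =====
def Claim_equal_getSubsetComputationAllocation : Prop := ∀ (vulnCount : Int) (coreCount : Int), Dom_getSubsetComputationAllocation vulnCount coreCount → Pre_getSubsetComputationAllocation vulnCount coreCount → Spec_getSubsetComputationAllocation vulnCount coreCount (getSubsetComputationAllocation vulnCount coreCount)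

-- ===== LEMMAS AND PROOFS =====

-- the core index appended at step k, and A's flip flag before step k (for coreCount = c ≥ 1)
def patIdx (c k : Nat) : Int :=
  if k % (c + 4) < c then ((k % (c + 4) : Nat) : Int) else (c : Int) + 3 - ((k % (c + 4) : Nat) : Int)

def flipOf (c k : Nat) : Bool := decide (c ≤ k % (c + 4))

-- B's pattern lookup at step k is patIdx c k
lemma lookup_eq (c k : Nat) :
    PySem.List.pyGetD ((List.range c).map Int.ofNat ++ [3, 2, 1, 0])
      ((k % (c + 4) : Nat) : Int) 0 = patIdx c k := by
  rw [PySem.List.pyGetD_natCast]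
  unfold patIdx
  set r := k % (c + 4) with hrdef
  have hr : r < c + 4 := hrdef ▸ Nat.mod_lt _ (by omega)
  by_cases h : r < c
  · rw [if_pos h, List.getD_eq_getElem _ _ (by simp; omega), List.getElem_append_left (by simpa using h)]
    simp
  · rw [if_neg h, List.getD_append_right _ _ _ _ (by simp; omega)]
    simp only [List.length_map, List.length_range]
    have : r - c = 0 ∨ r - c = 1 ∨ r - c = 2 ∨ r - c = 3 := by omega
    rcases this with h' | h' | h' | h' <;> simp [h'] <;> omega

-- one step of A's state machine from the invariant state reproduces the invariant
lemma stepA_eq (c : Nat) (hc : 1 ≤ c) (rs : List (List Int)) (k : Nat) (i : Int) :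
    stepA (c : Int) (rs, patIdx c k, flipOf c k) i
      = (pyAppendAt rs (patIdx c k) i, patIdx c (k + 1), flipOf c (k + 1)) := by
  have hr : k % (c + 4) < c + 4 := Nat.mod_lt _ (by omega)
  have hs : (k + 1) % (c + 4) = if k % (c + 4) + 1 = c + 4 then 0 else k % (c + 4) + 1 := by
    rw [Nat.add_mod]
    have h1 : 1 % (c + 4) = 1 := Nat.mod_eq_of_lt (by omega)
    rw [h1]
    split_ifs with h
    · rw [h, Nat.mod_self]
    · exact Nat.mod_eq_of_lt (by omega)
  unfold stepA patIdx flipOf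
  rw [hs]
  set r := k % (c + 4) with hrdef
  dsimp only
  split_ifs <;>
    simp only [Prod.mk.injEq, decide_eq_false_iff_not, decide_eq_true_eq, not_le, not_lt] at * <;>
    refine ⟨by trivial, by omega, ?_⟩ <;>
    first
      | rfl
      | exact (decide_eq_true (by omega)).symm
      | exact (decide_eq_false (by omega)).symm
      | exact decide_eq_true (by omega)
      | exact decide_eq_false (by omega)
      | exact decide_eq_decide.mpr (by omega)

-- the loop invariant: A's fold carries B's fold plus (patIdx, flipOf)
lemma loop_eq (c : Nat) (hc : 1 ≤ c) (n : Nat) (rs0 : List (List Int)) :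
    ((List.range n).map Int.ofNat).foldl (stepA (c : Int)) (rs0, 0, false)
      = (((List.range n).map Int.ofNat).foldl
          (fun rs i => pyAppendAt rs
            (PySem.List.pyGetD ((List.range c).map Int.ofNat ++ [3, 2, 1, 0])
              (PySem.Int.mod i (((((List.range c).map Int.ofNat ++ [3, 2, 1, 0]) : List Int)).length : Int)) 0) i)
          rs0,
        patIdx c n, flipOf c n) := by
  induction n with
  | zero =>
      simp only [List.range_zero, List.map_nil, List.foldl_nil, Prod.mk.injEq, patIdx, flipOf]
      refine ⟨by trivial, by simp; omega, by simp; omega⟩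
  | succ n ih =>
      rw [List.range_succ, List.map_append, List.foldl_append, List.foldl_append, ih]
      simp only [List.map_cons, List.map_nil, List.foldl_cons, List.foldl_nil]
      rw [stepA_eq c hc _ n _]
      have hlen : ((((List.range c).map Int.ofNat ++ [3, 2, 1, 0]) : List Int)).length = c + 4 := by simp
      rw [hlen]
      have hmod : PySem.Int.mod (Int.ofNat n) ((c + 4 : Nat) : Int) = ((n % (c + 4) : Nat) : Int) := by
        simpa using PySem.Int.mod_natCast n (c + 4)
      rw [show (Int.ofNat n) = ((n : Nat) : Int) from rfl] at *
      rw [hmod, lookup_eq c n]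

lemma foldl_append_nil (l : List Int) (init : List (List Int)) :
    l.foldl (fun rs _ => rs ++ [[]]) init = init ++ List.replicate l.length ([] : List Int) := by
  induction l generalizing init with
  | nil => simp
  | cons x xs ih => rw [List.foldl_cons, ih]; simp [List.replicate_succ]

lemma pyRange_zero_eq_map (b : Int) :
    PySem.List.pyRange 0 b 1 = (List.range b.toNat).map Int.ofNat := by
  rw [PySem.List.pyRange_one]
  simp [Int.ofNat_eq_natCast]

-- A builds the initial responsibilities by repeated append, B by a map; both are the same list
lemma init_eq (coreCount : Int) :
    (PySem.List.pyRange 0 coreCount 1).foldl (fun rs _ => rs ++ [[]]) ([] : List (List Int))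
      = (PySem.List.pyRange 0 coreCount 1).map (fun _ => []) := by
  rw [foldl_append_nil]
  simp [List.map_const']

-- ===== VERDICT (by name: the statement is the Claim_ definition above) =====
theorem getSubsetComputationAllocation_spec : Claim_equal_getSubsetComputationAllocation := by
  intro vulnCount coreCount _ hpre
  show getSubsetComputationAllocation vulnCount coreCount
      = getSubsetComputationAllocation_alt vulnCount coreCount
  unfold getSubsetComputationAllocation getSubsetComputationAllocation_alt
  dsimp only
  rw [init_eq]
  by_cases hv : vulnCount ≤ 0
  · rw [PySem.List.pyRange_one_eq_nil hv]
    simp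
  · have hc1 : 1 ≤ coreCount := by
      rcases hpre with h | h | h <;> omega
    have hcc : ((coreCount.toNat : Nat) : Int) = coreCount := Int.toNat_of_nonneg (by omega)
    rw [pyRange_zero_eq_map vulnCount, pyRange_zero_eq_map coreCount]
    rw [← hcc]
    rw [loop_eq coreCount.toNat (by omega) vulnCount.toNat _]
    simp [max_eq_left (show (0 : Int) ≤ coreCount by omega)]
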